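-- pv_equiv track=rewrite | github.com/Superb-AI-Suite/spb-cli | spb/libs/phy_credit/phy_credit/common/utils.py | count_properties
-- ===== SOURCE A (Python) =====
-- def count_properties(properties):
--     result = {}
--
--     for property in properties:
--         unique_option_id = property["property_option_id"]
--         if unique_option_id not in result:
--             result[unique_option_id] = {**property, "count": 1}
--         else:
--             result[unique_option_id]["count"] += 1
--
--     return list(result.values())
-- ===== SOURCE B (Python) =====
-- def count_properties(properties):
--     keys = [p["property_option_id"] for p in properties]
--     out = []
--     seen = []
--     for p, k in zip(properties, keys):
--         if k not in seen:
--             out.append({**p, "count": keys.count(k)})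
--         seen.append(k)
--     return out
-- ===== Notes on version B (the rewrite author's own statement) =====
-- stated objective: alternative
-- what changed: B drops A's result dict entirely: it precomputes the list of option ids, then builds the output list directly, appending {**p, 'count': keys.count(k)} at each first appearance (tracked by a seen list) so the total comes from list.count instead of in-place increments.
import Mathlib
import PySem

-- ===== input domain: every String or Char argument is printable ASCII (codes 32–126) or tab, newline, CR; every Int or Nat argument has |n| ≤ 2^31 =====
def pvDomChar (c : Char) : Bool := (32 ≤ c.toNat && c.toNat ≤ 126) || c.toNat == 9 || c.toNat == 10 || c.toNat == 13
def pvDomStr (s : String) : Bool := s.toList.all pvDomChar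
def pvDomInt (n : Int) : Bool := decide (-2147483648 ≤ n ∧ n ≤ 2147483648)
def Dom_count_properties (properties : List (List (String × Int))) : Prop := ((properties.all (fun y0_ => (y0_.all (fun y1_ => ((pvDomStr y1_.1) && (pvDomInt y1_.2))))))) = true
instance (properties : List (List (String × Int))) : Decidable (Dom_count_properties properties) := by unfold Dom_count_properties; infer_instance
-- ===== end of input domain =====

-- B replaces A's incrementally-updated result dict with a direct list build: totals via list.count, first appearance via a seen list; same results.

-- ===== PORT A =====
-- A: one pass; first occurrence inserts {**property, "count": 1}, later ones increment result[uid]["count"].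
def count_properties (properties : List (List (String × Int))) : List (List (String × Int)) :=
  (properties.foldl
    (fun (result : PySem.Dict Int (PySem.Dict String Int)) property =>
      let p := PySem.Dict.ofList property
      let unique_option_id := p.getD "property_option_id" 0
      if result.contains unique_option_id = false then
        result.insert unique_option_id (p.insert "count" 1)
      else
        result.modify unique_option_id PySem.Dict.empty
          (fun d => d.modify "count" 0 (· + 1)))
    PySem.Dict.empty).values.map (fun d => d.items)

-- ===== PORT B =====
-- B: keys list first; then append {**p, "count": keys.count(k)} at each first appearance.
def count_properties_alt (properties : List (List (String × Int))) : List (List (String × Int)) :=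
  let keys := properties.map (fun p => (PySem.Dict.ofList p).getD "property_option_id" 0)
  ((properties.zip keys).foldl
    (fun (acc : List (List (String × Int)) × List Int) pk =>
      let k := pk.2
      (if acc.2.contains k then acc.1
       else acc.1 ++ [((PySem.Dict.ofList pk.1).insert "count" ((keys.count k : Nat) : Int)).items],
       acc.2 ++ [k]))
    ([], [])).1

-- ===== PRECONDITION & SPEC =====
-- Pre_ excludes exactly the inputs where some property lacks the key "property_option_id": there A (and B) raise KeyError.
def Pre_count_properties (properties : List (List (String × Int))) : Prop :=
  ∀ property ∈ properties, ∃ e ∈ property, e.1 = "property_option_id"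
instance (properties : List (List (String × Int))) : Decidable (Pre_count_properties properties) := by unfold Pre_count_properties; infer_instance

def pvWitness_count_properties : (List (List (String × Int))) :=
  [[("property_option_id", 1), ("x", 5)], [("property_option_id", 1)], [("property_option_id", 2)]]

def Spec_count_properties (properties : List (List (String × Int))) (out : List (List (String × Int))) : Prop := out = count_properties_alt properties
instance (properties : List (List (String × Int))) (out : List (List (String × Int))) : Decidable (Spec_count_properties properties out) := by unfold Spec_count_properties; infer_instance

-- ===== CLAIM (what is proved, stated in full; the proofs are below) =====
def Claim_equal_count_properties : Prop := ∀ (properties : List (List (String × Int))), Dom_count_properties properties → Pre_count_properties properties → Spec_count_properties properties (count_properties properties)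

-- ===== LEMMAS AND PROOFS =====

-- the option id both programs read from a property
def pvKey (property : List (String × Int)) : Int :=
  (PySem.Dict.ofList property).getD "property_option_id" 0

-- A's loop body
def pvStepA (result : PySem.Dict Int (PySem.Dict String Int)) (property : List (String × Int)) :
    PySem.Dict Int (PySem.Dict String Int) :=
  let p := PySem.Dict.ofList property
  let unique_option_id := p.getD "property_option_id" 0
  if result.contains unique_option_id = false then
    result.insert unique_option_id (p.insert "count" 1)
  else
    result.modify unique_option_id PySem.Dict.empty
      (fun d => d.modify "count" 0 (· + 1))

-- B's loop body, parametrised by the full key list T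
def pvStepB (T : List Int) (acc : List (List (String × Int)) × List Int)
    (property : List (String × Int)) : List (List (String × Int)) × List Int :=
  let k := pvKey property
  (if acc.2.contains k then acc.1
   else acc.1 ++ [((PySem.Dict.ofList property).insert "count" ((T.count k : Nat) : Int)).items],
   acc.2 ++ [k])

lemma pvStepA_new (R : PySem.Dict Int (PySem.Dict String Int)) (p : List (String × Int))
    (hc : R.contains (pvKey p) = false) :
    pvStepA R p = R.insert (pvKey p) ((PySem.Dict.ofList p).insert "count" 1) := by
  show (if R.contains (pvKey p) = false then
      R.insert (pvKey p) ((PySem.Dict.ofList p).insert "count" 1)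
    else
      R.modify (pvKey p) PySem.Dict.empty (fun d => d.modify "count" 0 (· + 1))) = _
  rw [if_pos hc]

lemma pvStepA_old (R : PySem.Dict Int (PySem.Dict String Int)) (p : List (String × Int))
    (hc : R.contains (pvKey p) = true) :
    pvStepA R p = R.insert (pvKey p)
      ((R.getD (pvKey p) PySem.Dict.empty).insert "count"
        ((R.getD (pvKey p) PySem.Dict.empty).getD "count" 0 + 1)) := by
  show (if R.contains (pvKey p) = false then
      R.insert (pvKey p) ((PySem.Dict.ofList p).insert "count" 1)
    else
      R.modify (pvKey p) PySem.Dict.empty (fun d => d.modify "count" 0 (· + 1))) = _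
  rw [if_neg (by rw [hc]; exact fun h => absurd h (by decide))]
  rfl

-- Core invariant: flattening A's loop result equals B's output list, provided out is R's
-- entries with each "count" raised by the key's multiplicity in the remaining suffix,
-- seen agrees with R's key set, and T counts agree with the suffix for unseen keys.
lemma pv_core (suf : List (List (String × Int))) (T : List Int)
    (R : PySem.Dict Int (PySem.Dict String Int))
    (out : List (List (String × Int))) (seen : List Int)
    (h1 : ∀ k : Int, R.contains k = seen.contains k)
    (h2 : R.keys.Nodup)
    (h3 : ∀ k : Int, R.contains k = false → (T.count k : Int) = ((suf.map pvKey).count k : Int))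
    (h4 : out = R.items.map (fun e =>
        (e.2.insert "count" (e.2.getD "count" 0 + ((suf.map pvKey).count e.1 : Int))).items))
    (h5 : ∀ e ∈ R.items, ∃ d v, e.2 = PySem.Dict.insert d "count" v) :
    (suf.foldl pvStepA R).items.map (fun e => e.2.items) = (suf.foldl (pvStepB T) (out, seen)).1 := by
  induction suf generalizing R out seen with
  | nil =>
      simp only [List.foldl_nil, h4]
      apply List.map_congr_left
      intro e he
      obtain ⟨d, v, hdv⟩ := h5 e he
      simp only [List.map_nil, List.count_nil, Int.natCast_zero, add_zero]
      rw [hdv, PySem.Dict.getD_insert_self, PySem.Dict.insert_insert_self]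
  | cons p rest ih =>
      have hmemk : ∀ e ∈ R.items, R.contains e.1 = true := by
        intro e he
        rw [PySem.Dict.contains_eq_decide_mem_keys]
        exact decide_eq_true (List.mem_map_of_mem he)
      simp only [List.foldl_cons]
      by_cases hc : R.contains (pvKey p) = false
      · -- first occurrence of this key
        have hseen : pvKey p ∉ seen := by
          have := h1 (pvKey p); rw [hc] at this; simpa using this.symm
        have hnotk : ∀ e ∈ R.items, e.1 ≠ pvKey p := by
          intro e he hek
          have hme := hmemk e he
          rw [hek, hc] at hme
          exact Bool.false_ne_true hme
        have hTk : (T.count (pvKey p) : Int) = ((rest.map pvKey).count (pvKey p) : Int) + 1 := by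
          rw [h3 _ hc]; simp
        rw [pvStepA_new R p hc,
          show pvStepB T (out, seen) p
            = (out ++ [((PySem.Dict.ofList p).insert "count" ((T.count (pvKey p) : Nat) : Int)).items],
               seen ++ [pvKey p]) by
            simp [pvStepB, hseen]]
        apply ih
        · intro k
          rw [PySem.Dict.contains_insert, h1]
          by_cases hk : k = pvKey p <;> simp [hk]
        · exact PySem.Dict.nodup_keys_insert _ _ _ h2
        · intro k hk
          rw [PySem.Dict.contains_insert] at hk
          simp only [Bool.or_eq_false_iff, beq_eq_false_iff_ne, ne_eq] at hk
          rw [h3 k hk.2]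
          simp [Ne.symm hk.1]
        · rw [PySem.Dict.items_insert_of_not_contains _ _ hc, List.map_append, h4]
          congr 1
          · apply List.map_congr_left
            intro e he
            have hne : ((pvKey p == e.1) = false) := by
              simp [Ne.symm (hnotk e he)]
            simp [List.count_cons, hne]
          · simp only [List.map_cons, List.map_nil, List.cons.injEq, and_true]
            rw [PySem.Dict.insert_insert_self, PySem.Dict.getD_insert_self, hTk]
            congr 2
            omega
        · intro e he
          rw [PySem.Dict.items_insert_of_not_contains _ _ hc] at he
          rcases List.mem_append.mp he with he | he
          · exact h5 e he
          · simp only [List.mem_singleton] at he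
            exact ⟨_, _, by rw [he]⟩
      · -- key already present: A increments, B only extends seen
        have hc' : R.contains (pvKey p) = true := by
          cases h : R.contains (pvKey p) with
          | false => exact absurd h hc
          | true => rfl
        have hseen : pvKey p ∈ seen := by
          have := h1 (pvKey p); rw [hc'] at this; simpa using this.symm
        rw [pvStepA_old R p hc',
          show pvStepB T (out, seen) p = (out, seen ++ [pvKey p]) by simp [pvStepB, hseen]]
        apply ih
        · intro k
          rw [PySem.Dict.contains_insert, h1]
          by_cases hk : k = pvKey p
          · subst hk; rw [← h1, hc']; simp
          · simp [hk]
        · rw [PySem.Dict.keys_insert_of_contains _ _ hc']; exact h2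
        · intro k hk
          rw [PySem.Dict.contains_insert] at hk
          simp only [Bool.or_eq_false_iff, beq_eq_false_iff_ne, ne_eq] at hk
          rw [h3 k hk.2]
          simp [Ne.symm hk.1]
        · rw [PySem.Dict.items_insert_of_contains _ _ hc', List.map_map, h4]
          apply List.map_congr_left
          intro e he
          by_cases hek : e.1 = pvKey p
          · have hgd : R.getD e.1 PySem.Dict.empty = e.2 := by
              have : (e.1, e.2) ∈ R.items := he
              exact PySem.Dict.getD_of_mem_items R this h2 _
            have hbeq : ((e.1 == pvKey p) = true) := by simp [hek]
            simp only [Function.comp_apply, hbeq, if_pos]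
            rw [← hek, hgd, PySem.Dict.insert_insert_self, PySem.Dict.getD_insert_self]
            have hcnt : ((p :: rest).map pvKey).count e.1 = (rest.map pvKey).count e.1 + 1 := by
              simp [hek]
            rw [hcnt]
            congr 2
            push_cast
            ring
          · have hbeq : ((e.1 == pvKey p) = false) := by simp [hek]
            have hcnt : ((p :: rest).map pvKey).count e.1 = (rest.map pvKey).count e.1 := by
              simp [Ne.symm hek]
            simp only [Function.comp_apply, hbeq, Bool.false_eq_true, if_false, hcnt]
        · intro e he
          rw [PySem.Dict.items_insert_of_contains _ _ hc'] at he
          obtain ⟨e', he', hee⟩ := List.mem_map.mp he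
          by_cases hek : (e'.1 == pvKey p) = true
          · rw [if_pos hek] at hee
            exact ⟨_, _, by rw [← hee]⟩
          · rw [if_neg hek] at hee
            rw [← hee]
            exact h5 e' he'

-- zipping a list with a mapped copy of itself is mapping the pairing
lemma pv_zip_map_self {α β : Type} (l : List α) (f : α → β) :
    l.zip (l.map f) = l.map (fun a => (a, f a)) := by
  induction l with
  | nil => rfl
  | cons x xs ih => simpa [List.zip] using ih

-- ===== VERDICT (by name: the statement is the Claim_ definition above) =====
theorem count_properties_spec : Claim_equal_count_properties := by
  intro properties _ _
  show count_properties properties = count_properties_alt properties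
  have hB : count_properties_alt properties
      = (properties.foldl (pvStepB (properties.map pvKey)) ([], [])).1 := by
    unfold count_properties_alt
    simp only [pv_zip_map_self, List.foldl_map]
    rfl
  have hA : count_properties properties
      = ((properties.foldl pvStepA PySem.Dict.empty).items.map Prod.snd).map
          (fun d => d.items) := rfl
  rw [hA, hB, List.map_map]
  exact pv_core properties (properties.map pvKey) PySem.Dict.empty [] []
    (fun k => rfl) PySem.Dict.nodup_keys_empty (fun k _ => rfl) rfl
    (fun e he => absurd he (List.not_mem_nil))
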